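-- pv_equiv track=rewrite | github.com/kingsbalfx/jaguar | ict_trading_bot/strategy/pre_trade_analysis.py | _context_alignment
-- ===== SOURCE A (Python) =====
-- def _directional_trends(states):
--     return [
--         state.get("trend")
--         for state in states
--         if isinstance(state, dict) and state.get("trend") in ("bullish", "bearish")
--     ]
--
-- def _context_alignment(overall_trend, context_states):
--     if overall_trend not in ("bullish", "bearish"):
--         return "unclear"
--     context_trends = _directional_trends(context_states)
--     if not context_trends:
--         return "unclear"
--     aligned = sum(1 for trend in context_trends if trend == overall_trend)
--     if aligned == len(context_trends):
--         return "aligned"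
--     if aligned == 0:
--         return "opposed"
--     return "mixed"
-- ===== SOURCE B (Python) =====
-- def _context_alignment(overall_trend, context_states):
--     if overall_trend not in ("bullish", "bearish"):
--         return "unclear"
--     seen_aligned = False
--     seen_opposed = False
--     for state in context_states:
--         if not isinstance(state, dict):
--             continue
--         trend = state.get("trend")
--         if trend not in ("bullish", "bearish"):
--             continue
--         if trend == overall_trend:
--             seen_aligned = True
--         else:
--             seen_opposed = True
--     if seen_aligned and seen_opposed:
--         return "mixed"
--     if seen_aligned:
--         return "aligned"
--     if seen_opposed:
--         return "opposed"
--     return "unclear"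
-- ===== Notes on version B (the rewrite author's own statement) =====
-- stated objective: simpler
-- what changed: Replaces building an intermediate list of directional trends plus a counting pass (aligned == len / aligned == 0) with a single pass over context_states maintaining two boolean flags (seen an aligned trend / seen an opposed trend) and classifying from the flags.
import Mathlib
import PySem

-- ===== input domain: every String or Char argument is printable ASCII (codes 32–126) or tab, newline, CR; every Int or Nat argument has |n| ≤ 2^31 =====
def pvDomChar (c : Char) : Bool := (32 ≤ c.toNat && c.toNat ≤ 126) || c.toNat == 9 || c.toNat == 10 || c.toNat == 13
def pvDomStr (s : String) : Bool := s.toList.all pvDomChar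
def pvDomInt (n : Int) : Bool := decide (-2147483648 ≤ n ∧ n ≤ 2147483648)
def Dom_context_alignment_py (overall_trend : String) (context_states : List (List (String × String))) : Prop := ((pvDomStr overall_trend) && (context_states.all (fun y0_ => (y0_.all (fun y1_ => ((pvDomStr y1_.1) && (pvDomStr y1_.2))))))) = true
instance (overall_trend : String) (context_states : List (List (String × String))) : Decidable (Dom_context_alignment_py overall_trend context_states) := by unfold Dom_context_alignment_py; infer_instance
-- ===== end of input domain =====

-- ===== PORT A =====
-- B replaces A's intermediate list of directional trends and its counting pass with a
-- single fold over context_states maintaining two boolean flags (objective: simpler).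
def directional_trends (states : List (List (String × String))) : List String :=
  states.filterMap (fun state =>
    match (PySem.Dict.mk state).get? "trend" with
    | some t => if t = "bullish" ∨ t = "bearish" then some t else none
    | none => none)

def context_alignment_py (overall_trend : String) (context_states : List (List (String × String))) : String :=
  if overall_trend = "bullish" ∨ overall_trend = "bearish" then
    let context_trends := directional_trends context_states
    if context_trends = [] then "unclear"
    else
      let aligned := context_trends.countP (fun t => t = overall_trend)
      if aligned = context_trends.length then "aligned"
      else if aligned = 0 then "opposed"
      else "mixed"
  else "unclear"

-- ===== PORT B =====
def pvStep (overall_trend : String) (acc : Bool × Bool) (state : List (String × String)) : Bool × Bool :=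
  match (PySem.Dict.mk state).get? "trend" with
  | some t =>
      if t = "bullish" ∨ t = "bearish" then
        if t = overall_trend then (true, acc.2) else (acc.1, true)
      else acc
  | none => acc

def context_alignment_py_alt (overall_trend : String) (context_states : List (List (String × String))) : String :=
  if overall_trend = "bullish" ∨ overall_trend = "bearish" then
    let p := context_states.foldl (pvStep overall_trend) (false, false)
    if p.1 && p.2 then "mixed"
    else if p.1 then "aligned"
    else if p.2 then "opposed"
    else "unclear"
  else "unclear"

-- ===== PRECONDITION & SPEC =====
def Spec_context_alignment_py (overall_trend : String) (context_states : List (List (String × String))) (out : String) : Prop := out = context_alignment_py_alt overall_trend context_states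
instance (overall_trend : String) (context_states : List (List (String × String))) (out : String) : Decidable (Spec_context_alignment_py overall_trend context_states out) := by unfold Spec_context_alignment_py; infer_instance

-- ===== CLAIM (what is proved, stated in full; the proofs are below) =====
def Claim_equal_context_alignment_py : Prop := ∀ (overall_trend : String) (context_states : List (List (String × String))), Dom_context_alignment_py overall_trend context_states → Spec_context_alignment_py overall_trend context_states (context_alignment_py overall_trend context_states)

-- ===== LEMMAS AND PROOFS =====
lemma foldl_flags (ot : String) (cs : List (List (String × String))) (acc : Bool × Bool) :
    cs.foldl (pvStep ot) acc =
      (acc.1 || (directional_trends cs).any (fun t => t = ot),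
       acc.2 || (directional_trends cs).any (fun t => ¬ t = ot)) := by
  induction cs generalizing acc with
  | nil => simp [directional_trends]
  | cons s cs ih =>
    simp only [List.foldl_cons, ih, directional_trends, List.filterMap_cons, pvStep]
    cases h : (PySem.Dict.mk s).get? "trend" with
    | none => simp
    | some t =>
      by_cases hd : t = "bullish" ∨ t = "bearish"
      · by_cases ha : t = ot
        · subst ha
          simp [hd, List.any_cons]
        · simp [hd, ha, List.any_cons]
      · simp [hd]

theorem context_alignment_py_spec : Claim_equal_context_alignment_py := by
  intro ot cs _
  unfold Spec_context_alignment_py context_alignment_py context_alignment_py_alt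
  by_cases h : ot = "bullish" ∨ ot = "bearish"
  · simp only [h, if_true, foldl_flags, Bool.false_or]
    set ts := directional_trends cs with hts
    by_cases hnil : ts = []
    · simp [hnil]
    · rw [if_neg hnil]
      by_cases hB : ∃ x ∈ ts, ¬ x = ot
      · have h1 : ¬ ts.countP (fun t => t = ot) = ts.length := by
          intro hc
          rcases hB with ⟨x, hx, hxne⟩
          exact hxne (by simpa using List.countP_eq_length.mp hc x hx)
        by_cases hA : ∃ x ∈ ts, x = ot
        · have h2 : ¬ ts.countP (fun t => t = ot) = 0 := by
            intro hc
            rcases hA with ⟨x, hx, hxe⟩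
            exact (List.countP_eq_zero.mp hc x hx) (by simpa using hxe)
          simp [h1, h2, List.any_eq_true, hA, hB]
        · have h2 : ts.countP (fun t => t = ot) = 0 := by
            apply List.countP_eq_zero.mpr
            intro x hx
            simp only [decide_eq_true_eq]
            exact fun hxe => hA ⟨x, hx, hxe⟩
          have hlen0 : ¬ ((0 : Nat) = ts.length) := fun hc => hnil (List.length_eq_zero_iff.mp hc.symm)
          simp [h2, hlen0, List.any_eq_true, hA, hB]
      · have hall : ∀ x ∈ ts, x = ot := fun x hx =>
          Classical.byContradiction fun hne => hB ⟨x, hx, hne⟩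
        have h1 : ts.countP (fun t => t = ot) = ts.length := by
          apply List.countP_eq_length.mpr
          intro x hx
          simpa using hall x hx
        have hA : ∃ x ∈ ts, x = ot := by
          rcases List.exists_mem_of_ne_nil ts hnil with ⟨x, hx⟩
          exact ⟨x, hx, hall x hx⟩
        simp [h1, List.any_eq_true, hA, hB]
  · simp [h]
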